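-- pv_equiv track=rewrite | github.com/micahtyong/foobar | solution2b.py | pay_maximum
-- ===== SOURCE A (Python) =====
-- def pay_maximum(total_lambs):
--     total = 0
--     payoutList = []
--     n = 0
--     while n <= total_lambs:  # unnecessarily long while loop
--         pay = 2 ** n
--         payoutList.append(pay)
--         total += pay
--         if total > total_lambs:
--             break
--         n += 1
--     return payoutList
-- ===== SOURCE B (Python) =====
-- def pay_maximum(total_lambs):
--     if total_lambs < 0:
--         return []
--     k = (total_lambs + 1).bit_length()
--     return [2 ** i for i in range(k)]
-- ===== Notes on version B (the rewrite author's own statement) =====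
-- stated objective: idiomatic
-- what changed: Replaces the incremental doubling/summing while-loop with a closed-form list length k = (total_lambs+1).bit_length() followed by a single comprehension.
import Mathlib
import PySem

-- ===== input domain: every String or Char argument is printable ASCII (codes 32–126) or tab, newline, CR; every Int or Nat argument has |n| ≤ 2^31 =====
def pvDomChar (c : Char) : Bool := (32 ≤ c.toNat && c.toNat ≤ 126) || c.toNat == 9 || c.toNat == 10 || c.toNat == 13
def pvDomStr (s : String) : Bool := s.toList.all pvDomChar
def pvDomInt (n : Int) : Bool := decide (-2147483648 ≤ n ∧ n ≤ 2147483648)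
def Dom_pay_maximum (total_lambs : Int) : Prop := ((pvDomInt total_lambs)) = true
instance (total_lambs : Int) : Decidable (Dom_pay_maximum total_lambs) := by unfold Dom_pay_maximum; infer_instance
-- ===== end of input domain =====

-- B changes the structure: the list length is computed in closed form (bit_length)
-- instead of accumulating a running sum in a loop; equivalence proved on all Int inputs.

-- ===== PORT A =====
-- while-loop of A, state (total, payoutList, n); n only ever non-negative in A, kept as Nat
def payA_loop (L total : Int) (acc : List Int) (n : Nat) : List Int :=
  if (n : Int) ≤ L then
    let pay : Int := 2 ^ n
    let acc' := acc ++ [pay]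
    let total' := total + pay
    if total' > L then acc' else payA_loop L total' acc' (n + 1)
  else acc
termination_by (L + 1 - (n : Int)).toNat
decreasing_by omega

def pay_maximum (total_lambs : Int) : List Int :=
  payA_loop total_lambs 0 [] 0

-- ===== PORT B =====
-- (m).bit_length() for m ≥ 1 is Nat.log2 m + 1
def pay_maximum_alt (total_lambs : Int) : List Int :=
  if total_lambs < 0 then []
  else (List.range (Nat.log2 (total_lambs + 1).toNat + 1)).map (fun i => (2 : Int) ^ i)

-- ===== PRECONDITION & SPEC =====
def Spec_pay_maximum (total_lambs : Int) (out : List Int) : Prop := out = pay_maximum_alt total_lambs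
instance (total_lambs : Int) (out : List Int) : Decidable (Spec_pay_maximum total_lambs out) := by unfold Spec_pay_maximum; infer_instance

-- ===== CLAIM (what is proved, stated in full; the proofs are below) =====
def Claim_equal_pay_maximum : Prop := ∀ (total_lambs : Int), Dom_pay_maximum total_lambs → Spec_pay_maximum total_lambs (pay_maximum total_lambs)

-- ===== LEMMAS AND PROOFS =====

lemma int_lt_two_pow (n : Nat) : (n : Int) < 2 ^ n := by
  exact_mod_cast Nat.lt_two_pow_self

lemma payA_loop_invariant (L : Int) :
    ∀ (m n : Nat), (L + 1 - (n : Int)).toNat = m → (2 : Int) ^ n - 1 ≤ L →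
      payA_loop L ((2 : Int) ^ n - 1) ((List.range n).map (fun i => (2 : Int) ^ i)) n
        = (List.range (Nat.log2 (L + 1).toNat + 1)).map (fun i => (2 : Int) ^ i) := by
  intro m
  induction m using Nat.strong_induction_on with
  | _ m ih =>
    intro n hm htot
    have hguard : (n : Int) ≤ L := le_trans (by have := int_lt_two_pow n; omega) htot
    rw [payA_loop, if_pos hguard]
    have hsum : (2 : Int) ^ n - 1 + 2 ^ n = 2 ^ (n + 1) - 1 := by ring
    by_cases hbr : (2 : Int) ^ n - 1 + 2 ^ n > L
    · simp only [hbr, if_pos]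
      have h1 : (2 : Int) ^ n ≤ L + 1 := by omega
      have h2 : L + 1 < (2 : Int) ^ (n + 1) := by omega
      have hL0 : 0 ≤ L + 1 := le_trans (by positivity) h1
      have hpow : ∀ k : Nat, ((2 : Int) ^ k).toNat = 2 ^ k := fun k => by
        rw [show ((2 : Int) ^ k) = ((2 ^ k : Nat) : Int) by push_cast; ring, Int.toNat_natCast]
      have hlog : Nat.log2 (L + 1).toNat = n := by
        rw [Nat.log2_eq_log_two]
        apply Nat.log_eq_of_pow_le_of_lt_pow
        · have h := Int.toNat_le_toNat h1
          rw [hpow] at h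
          exact h
        · rw [← hpow (n + 1)]
          omega
      rw [hlog, List.range_succ, List.map_append]
      simp
    · simp only [hbr, if_neg, not_false_iff]
      have htot' : (2 : Int) ^ (n + 1) - 1 ≤ L := by omega
      have hrec := ih ((L + 1 - (((n + 1) : Nat) : Int)).toNat) (by push_cast; omega) (n + 1) rfl htot'
      rw [show (2 : Int) ^ n - 1 + 2 ^ n = 2 ^ (n + 1) - 1 from hsum,
        show (List.range n).map (fun i => (2 : Int) ^ i) ++ [(2 : Int) ^ n]
            = (List.range (n + 1)).map (fun i => (2 : Int) ^ i) by
          rw [List.range_succ, List.map_append]; simp]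
      exact hrec

-- ===== VERDICT (by name: the statement is the Claim_ definition above) =====
theorem pay_maximum_spec : Claim_equal_pay_maximum := by
  intro L _
  unfold Spec_pay_maximum pay_maximum pay_maximum_alt
  by_cases hneg : L < 0
  · rw [payA_loop, if_neg (by exact_mod_cast not_le.mpr hneg), if_pos hneg]
  · rw [if_neg hneg]
    have := payA_loop_invariant L (L + 1 - (0 : Int)).toNat 0 rfl (by simpa using not_lt.mp hneg)
    simpa using this
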